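-- pv_equiv track=rewrite | github.com/DamianOakley/capitals_first | capitals_first.py | capitals_first
-- ===== SOURCE A (Python) =====
-- def capitals_first(sentence: str):
--     words = sentence.split()
--     uppercase_words = []
--     lowercase_words = []
--
--     for word in words:
--         if not word[0].isalpha():
--             continue
--         if word[0].isupper():
--             uppercase_words.append(word)
--         else:
--             lowercase_words.append(word)
--
--     product = " ".join(uppercase_words + lowercase_words)
--     return product
-- ===== SOURCE B (Python) =====
-- def capitals_first(sentence: str):
--     filtered = [w for w in sentence.split() if w[0].isalpha()]
--     return " ".join(sorted(filtered, key=lambda w: 0 if w[0].isupper() else 1))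
-- ===== Notes on version B (the rewrite author's own statement) =====
-- stated objective: idiomatic
-- what changed: Replaces the explicit two-accumulator partition loop with a filter comprehension followed by a single stable sorted() on a binary key, relying on sort stability to keep each group's original order.
import Mathlib
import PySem

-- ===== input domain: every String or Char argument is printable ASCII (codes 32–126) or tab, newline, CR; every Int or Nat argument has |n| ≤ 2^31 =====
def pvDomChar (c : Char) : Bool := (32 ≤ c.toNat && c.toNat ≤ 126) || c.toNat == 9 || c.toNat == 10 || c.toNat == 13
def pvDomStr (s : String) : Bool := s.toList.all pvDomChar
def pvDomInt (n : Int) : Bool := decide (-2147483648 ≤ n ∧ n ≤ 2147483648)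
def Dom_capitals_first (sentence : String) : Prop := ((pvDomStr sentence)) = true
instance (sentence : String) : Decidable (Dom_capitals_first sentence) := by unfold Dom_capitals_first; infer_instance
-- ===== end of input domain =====

-- B rewrites A's explicit two-accumulator partition loop as a filter plus one stable
-- binary-key sorted() call (idiomatic; same return value everywhere).

-- shared helper: `word[0]` — words produced by split() are nonempty, so pyGet? is
-- always `some`; the ' ' default is unreachable (isalpha ' ' = false anyway).
def pvFirst (w : String) : Char := (PySem.Str.pyGet? w 0).getD ' '

-- ===== PORT A =====
def capitals_first (sentence : String) : String :=
  let words := PySem.Str.split₀ sentence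
  let p := words.foldl
    (fun (acc : List String × List String) word =>
      if !(PySem.Chars.isalpha (pvFirst word)) then acc
      else if PySem.Chars.isupper (pvFirst word) then (acc.1 ++ [word], acc.2)
      else (acc.1, acc.2 ++ [word]))
    ([], [])
  PySem.Str.join " " (p.1 ++ p.2)

-- ===== PORT B =====
def capitals_first_alt (sentence : String) : String :=
  let filtered := (PySem.Str.split₀ sentence).filter
    (fun w => PySem.Chars.isalpha (pvFirst w))
  PySem.Str.join " "
    (PySem.List.sorted filtered
      (fun w => if PySem.Chars.isupper (pvFirst w) then (0 : Int) else 1) false)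

-- ===== PRECONDITION & SPEC =====
def Spec_capitals_first (sentence : String) (out : String) : Prop := out = capitals_first_alt sentence
instance (sentence : String) (out : String) : Decidable (Spec_capitals_first sentence out) := by unfold Spec_capitals_first; infer_instance

-- ===== CLAIM (what is proved, stated in full; the proofs are below) =====
def Claim_equal_capitals_first : Prop := ∀ (sentence : String), Dom_capitals_first sentence → Spec_capitals_first sentence (capitals_first sentence)

-- ===== LEMMAS AND PROOFS =====

-- A's loop: the pair accumulator collects the two filters.
theorem afold (ws : List String) : ∀ (u l : List String),
    ws.foldl
      (fun (acc : List String × List String) word =>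
        if !(PySem.Chars.isalpha (pvFirst word)) then acc
        else if PySem.Chars.isupper (pvFirst word) then (acc.1 ++ [word], acc.2)
        else (acc.1, acc.2 ++ [word]))
      (u, l)
    = (u ++ ws.filter (fun w => PySem.Chars.isalpha (pvFirst w) && PySem.Chars.isupper (pvFirst w)),
       l ++ ws.filter (fun w => PySem.Chars.isalpha (pvFirst w) && !PySem.Chars.isupper (pvFirst w))) := by
  induction ws with
  | nil => simp
  | cons x xs ih =>
    intro u l
    rw [List.foldl_cons]
    by_cases ha : PySem.Chars.isalpha (pvFirst x) = true
    · by_cases hu : PySem.Chars.isupper (pvFirst x) = true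
      · simp only [ha, hu, Bool.not_true, if_neg (by simp : ¬ (false = true)), if_pos rfl]
        rw [ih]
        simp [ha, hu]
      · simp only [ha, hu, Bool.not_true, if_neg (by simp : ¬ (false = true)), if_neg hu]
        rw [ih]
        simp [ha, hu]
    · have ha' : PySem.Chars.isalpha (pvFirst x) = false := by
        cases h : PySem.Chars.isalpha (pvFirst x) <;> simp_all
      simp only [ha', Bool.not_false, if_pos rfl]
      rw [ih]
      simp [ha']

-- inserting into a 0-block followed by a 1-block (binary keys)
theorem insertBy_bin (key : String → Int) (hkey : ∀ w, key w = 0 ∨ key w = 1)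
    (x : String) : ∀ (a0 a1 : List String),
    (∀ y ∈ a0, key y = 0) → (∀ y ∈ a1, key y = 1) →
    PySem.List.insertBy (fun a b => decide (key a < key b)) x (a0 ++ a1)
      = if key x = 0 then a0 ++ x :: a1 else (a0 ++ a1) ++ [x] := by
  intro a0
  induction a0 with
  | nil =>
    intro a1 _ h1
    rcases hkey x with hx | hx
    · cases a1 with
      | nil => simp [hx, PySem.List.insertBy]
      | cons y ys =>
        have : key y = 1 := h1 y (by simp)
        simp [hx, PySem.List.insertBy, this]
    · rw [PySem.List.insertBy_of_forall_not_before]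
      · simp [hx]
      · intro y hy
        have := h1 y hy
        simp [this, hx]
    | cons z zs ih =>
      intro a1 h0 h1
      have hz : key z = 0 := h0 z (by simp)
      have hxz : decide (key x < key z) = false := by
        rcases hkey x with hx | hx <;> simp [hx, hz]
      have : PySem.List.insertBy (fun a b => decide (key a < key b)) x ((z :: zs) ++ a1)
          = z :: PySem.List.insertBy (fun a b => decide (key a < key b)) x (zs ++ a1) := by
        simp [PySem.List.insertBy, hxz]
      rw [this, ih a1 (fun y hy => h0 y (by simp [hy])) h1]
      split <;> simp

-- the stable binary-key insertion-sort fold keeps a 0-block then a 1-block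
theorem foldl_insert_bin (key : String → Int) (hkey : ∀ w, key w = 0 ∨ key w = 1) :
    ∀ (xs a0 a1 : List String),
    (∀ y ∈ a0, key y = 0) → (∀ y ∈ a1, key y = 1) →
    xs.foldl (fun acc x => PySem.List.insertBy (fun a b => decide (key a < key b)) x acc) (a0 ++ a1)
      = (a0 ++ xs.filter (fun x => key x == 0)) ++ (a1 ++ xs.filter (fun x => key x == 1)) := by
  intro xs
  induction xs with
  | nil => intro a0 a1 _ _; simp
  | cons x xs ih =>
    intro a0 a1 h0 h1
    rw [List.foldl_cons, insertBy_bin key hkey x a0 a1 h0 h1]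
    rcases hkey x with hx | hx
    · have : a0 ++ x :: a1 = (a0 ++ [x]) ++ a1 := by simp
      rw [if_pos hx, this,
        ih (a0 ++ [x]) a1 (by intro y hy; rcases List.mem_append.mp hy with h | h
                              · exact h0 y h
                              · simp at h; simpa [h] using hx) h1]
      simp [List.filter_cons, hx]
    · have hx0 : ¬ key x = 0 := by omega
      have : (a0 ++ a1) ++ [x] = a0 ++ (a1 ++ [x]) := by simp
      rw [if_neg hx0, this,
        ih a0 (a1 ++ [x]) h0 (by intro y hy; rcases List.mem_append.mp hy with h | h
                                 · exact h1 y h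
                                 · simp at h; simpa [h] using hx)]
      simp [List.filter_cons, hx, hx0]

-- ===== VERDICT (by name: the statement is the Claim_ definition above) =====
theorem capitals_first_spec : Claim_equal_capitals_first := by
  intro sentence _
  unfold Spec_capitals_first capitals_first capitals_first_alt
  dsimp only
  set ws := PySem.Str.split₀ sentence with hws
  set key : String → Int := fun w => if PySem.Chars.isupper (pvFirst w) then (0 : Int) else 1 with hkeydef
  have hkey : ∀ w, key w = 0 ∨ key w = 1 := by
    intro w; by_cases h : PySem.Chars.isupper (pvFirst w) = true <;> simp [hkeydef, h]
  have hsorted := PySem.List.sorted_eq_foldl_insertBy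
    (ws.filter (fun w => PySem.Chars.isalpha (pvFirst w))) key
  have hfold := foldl_insert_bin key hkey
    (ws.filter (fun w => PySem.Chars.isalpha (pvFirst w))) [] [] (by simp) (by simp)
  simp only [List.nil_append] at hfold
  rw [afold ws [] []]
  simp only [List.nil_append, hsorted, hfold, List.filter_filter]
  congr 1
  congr 1
  · apply List.filter_congr
    intro w _
    by_cases h : PySem.Chars.isupper (pvFirst w) = true <;> simp [hkeydef, h]
  · apply List.filter_congr
    intro w _
    by_cases h : PySem.Chars.isupper (pvFirst w) = true <;> simp [hkeydef, h]
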